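-- pv_equiv track=rewrite | github.com/xiehaosz/leetcode | leetcode_lv2.py | sol_01_stack
-- ===== SOURCE A (Python) =====
-- def sol_01_stack(nums1, nums2, k):
--     def pick_max(nums, k):  # 选k个最大
--         stack = []
--         _k = len(nums) - k
--         for n in nums:
--             if _k and stack and stack[-1] < n:
--                 stack.pop()
--                 _k -= 1
--             stack.append(n)
--         return stack[:k]
--
--     def merge_max(arr_a, arr_b):
--         ans = []
--         while arr_a or arr_b:
--             larger = arr_a if arr_a > arr_b else arr_b  # 理解数组的比较规则
--             ans.append(larger.pop(0))   # pop(0)效率低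
--         return ans
--     # def merge_max(arr_a, arr_b):    # 针对pop(0)效率低改的指针操作
--     #     ans = []
--     #     pa, pb = 0, 0
--     #     size_a, size_b = len(arr_a), len(arr_b)
--     #     while (pa < size_a) or (pb < size_b):
--     #         if arr_a[pa:] > arr_b[pb:]:
--     #             ans.append(arr_a[pa])
--     #             pa += 1
--     #         else:
--     #             ans.append(arr_b[pb])
--     #             pb += 1
--     #     return ans
--
--     return max(merge_max(pick_max(nums1, i), pick_max(nums2, k-i))
--                for i in range(k+1) if i <= len(nums1) and k-i <= len(nums2))    # 遍历k的分解方式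
-- ===== SOURCE B (Python) =====
-- def sol_01_stack(nums1, nums2, k):
--     # B: no monotonic stack -- a subsequence is kept by deleting, left to right and with a
--     # budget of len(nums)-k deletions, every element smaller than its right neighbour;
--     # merge walks two index pointers, comparing suffixes in place (no slicing, no pop(0)).
--     def pick_max(nums, k):
--         budget = len(nums) - k
--         kept = []
--         for j in range(len(nums)):
--             if budget and j + 1 < len(nums) and nums[j] < nums[j + 1]:
--                 budget -= 1
--             else:
--                 kept.append(nums[j])
--         return kept[:k]
--
--     def suffix_gt(a, pa, b, pb):   # a[pa:] > b[pb:] without building the slices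
--         while pa < len(a) and pb < len(b):
--             if a[pa] != b[pb]:
--                 return a[pa] > b[pb]
--             pa += 1
--             pb += 1
--         return pa < len(a)
--
--     def merge_max(arr_a, arr_b):
--         ans = []
--         pa, pb = 0, 0
--         while pa < len(arr_a) or pb < len(arr_b):
--             if suffix_gt(arr_a, pa, arr_b, pb):
--                 ans.append(arr_a[pa])
--                 pa += 1
--             else:
--                 ans.append(arr_b[pb])
--                 pb += 1
--         return ans
--
--     candidates = [merge_max(pick_max(nums1, i), pick_max(nums2, k - i))
--                   for i in range(k + 1) if i <= len(nums1) and k - i <= len(nums2)]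
--     best = candidates[0]
--     for c in candidates[1:]:
--         if c > best:
--             best = c
--     return best
-- ===== Notes on version B (the rewrite author's own statement) =====
-- stated objective: alternative
-- what changed: pick_max's monotonic stack (append/pop with a deletion counter) is replaced by a single budgeted scan that deletes each element smaller than its right neighbour while the budget lasts, and the mutating pop(0) merge is replaced by a two-pointer walk comparing suffixes; the best split is taken from a materialized candidate list instead of max over a generator.
import Mathlib
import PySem

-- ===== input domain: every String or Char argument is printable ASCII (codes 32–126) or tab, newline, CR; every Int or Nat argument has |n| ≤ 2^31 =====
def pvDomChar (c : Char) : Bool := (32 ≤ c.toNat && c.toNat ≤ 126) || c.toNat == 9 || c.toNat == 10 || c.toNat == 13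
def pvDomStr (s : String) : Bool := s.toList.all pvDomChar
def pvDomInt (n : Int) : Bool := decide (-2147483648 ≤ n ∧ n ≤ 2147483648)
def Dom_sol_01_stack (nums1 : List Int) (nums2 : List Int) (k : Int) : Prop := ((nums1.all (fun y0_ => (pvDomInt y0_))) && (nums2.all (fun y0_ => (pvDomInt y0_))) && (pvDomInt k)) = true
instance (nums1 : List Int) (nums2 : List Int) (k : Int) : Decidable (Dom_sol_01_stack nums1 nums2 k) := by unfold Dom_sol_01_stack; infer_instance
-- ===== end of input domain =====

-- B replaces the monotonic-stack pick with a budgeted adjacent-deletion scan and the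
-- mutating pop(0) merge with a two-pointer suffix-comparison walk (objective: alternative).

-- Python's '>' on two int lists (lexicographic, shorter prefix is smaller)
def pyGtL : List Int → List Int → Bool
  | [], _ => false
  | _ :: _, [] => true
  | x :: xs, y :: ys => x > y || (x == y && pyGtL xs ys)

-- ===== PORT A =====

-- pick_max: fold over nums with state (stack, _k); 'stack[-1]' is getLast?, pop is dropLast
def pickMaxA (nums : List Int) (k : Int) : List Int :=
  let st := nums.foldl
    (fun (acc : List Int × Int) n =>
      if acc.2 != 0 && acc.1.getLast?.any (fun t => decide (t < n)) then
        (acc.1.dropLast ++ [n], acc.2 - 1)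
      else
        (acc.1 ++ [n], acc.2))
    ([], (nums.length : Int) - k)
  PySem.List.slice st.1 none (some k)   -- stack[:k]

-- merge_max: the while loop runs exactly len(a)+len(b) iterations, used as fuel;
-- 'larger.pop(0)' becomes head/tail of the list the comparison selects
def mergeMaxA : Nat → List Int → List Int → List Int
  | 0, _, _ => []
  | fuel + 1, a, b =>
    if a = [] ∧ b = [] then []
    else if pyGtL a b then a.headI :: mergeMaxA fuel a.tail b
    else b.headI :: mergeMaxA fuel a b.tail

-- max over the filtered generator: running first-max with an Option accumulator;
-- 'none' at the end is Python's ValueError on an empty generator (excluded by Pre_)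
def sol_01_stack (nums1 : List Int) (nums2 : List Int) (k : Int) : List Int :=
  let r := (PySem.List.pyRange 0 (k + 1) 1).foldl
    (fun (best : Option (List Int)) i =>
      if i ≤ (nums1.length : Int) ∧ k - i ≤ (nums2.length : Int) then
        let c := mergeMaxA ((pickMaxA nums1 i).length + (pickMaxA nums2 (k - i)).length)
                   (pickMaxA nums1 i) (pickMaxA nums2 (k - i))
        match best with
        | none => some c
        | some bb => some (if pyGtL c bb then c else bb)
      else best)
    none
  match r with
  | none => []        -- Python raises ValueError here; such inputs are excluded by Pre_
  | some v => v

-- ===== PORT B =====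

-- B's pick_max loop: walk the list comparing each element with its right neighbour,
-- deleting it while the deletion budget lasts
def scanDrop : Int → List Int → List Int
  | _, [] => []
  | _, [x] => [x]
  | budget, x :: y :: rest =>
    if budget ≠ 0 ∧ x < y then scanDrop (budget - 1) (y :: rest)
    else x :: scanDrop budget (y :: rest)

def pickMaxB (nums : List Int) (k : Int) : List Int :=
  PySem.List.slice (scanDrop ((nums.length : Int) - k) nums) none (some k)   -- kept[:k]

-- B's suffix_gt: a[pa:] > b[pb:] walked in place; the while loop advances pa and pb
-- together, so a.length + b.length bounds its iterations (used as fuel at the call site)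
def suffixGt : Nat → List Int → List Int → Nat → Nat → Bool
  | 0, a, _, pa, _ => decide (pa < a.length)
  | f + 1, a, b, pa, pb =>
    if pa < a.length ∧ pb < b.length then
      if a.getD pa 0 ≠ b.getD pb 0 then decide (b.getD pb 0 < a.getD pa 0)
      else suffixGt f a b (pa + 1) (pb + 1)
    else decide (pa < a.length)

-- B's merge_max: two index pointers; fuel = number of remaining loop iterations
def mergeMaxB : Nat → List Int → List Int → Nat → Nat → List Int
  | 0, _, _, _, _ => []
  | fuel + 1, a, b, pa, pb =>
    if pa < a.length ∨ pb < b.length then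
      if suffixGt (a.length + b.length) a b pa pb then
        a.getD pa 0 :: mergeMaxB fuel a b (pa + 1) pb
      else b.getD pb 0 :: mergeMaxB fuel a b pa (pb + 1)
    else []

def sol_01_stack_alt (nums1 : List Int) (nums2 : List Int) (k : Int) : List Int :=
  let cands := ((PySem.List.pyRange 0 (k + 1) 1).filter
      (fun i => decide (i ≤ (nums1.length : Int) ∧ k - i ≤ (nums2.length : Int)))).map
    (fun i =>
      let aa := pickMaxB nums1 i
      let bb := pickMaxB nums2 (k - i)
      mergeMaxB (aa.length + bb.length) aa bb 0 0)
  match cands with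
  | [] => []          -- candidates[0] raises IndexError here; excluded by Pre_
  | c :: cs => cs.foldl (fun best x => if pyGtL x best then x else best) c

-- ===== PRECONDITION & SPEC =====
-- Pre_ excludes exactly the inputs (k < 0 or k > len(nums1)+len(nums2)) on which A's
-- generator is empty and max() raises ValueError (B's candidates[0] raises IndexError).
def Pre_sol_01_stack (nums1 : List Int) (nums2 : List Int) (k : Int) : Prop :=
  0 ≤ k ∧ k ≤ (nums1.length : Int) + (nums2.length : Int)
instance (nums1 : List Int) (nums2 : List Int) (k : Int) : Decidable (Pre_sol_01_stack nums1 nums2 k) := by unfold Pre_sol_01_stack; infer_instance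

def pvWitness_sol_01_stack : List Int × List Int × Int := ([3, 1, 7], [2, 9], 3)

def Spec_sol_01_stack (nums1 : List Int) (nums2 : List Int) (k : Int) (out : List Int) : Prop := out = sol_01_stack_alt nums1 nums2 k
instance (nums1 : List Int) (nums2 : List Int) (k : Int) (out : List Int) : Decidable (Spec_sol_01_stack nums1 nums2 k out) := by unfold Spec_sol_01_stack; infer_instance

-- ===== CLAIM (what is proved, stated in full; the proofs are below) =====
def Claim_equal_sol_01_stack : Prop := ∀ (nums1 : List Int) (nums2 : List Int) (k : Int), Dom_sol_01_stack nums1 nums2 k → Pre_sol_01_stack nums1 nums2 k → Spec_sol_01_stack nums1 nums2 k (sol_01_stack nums1 nums2 k)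

-- ===== LEMMAS AND PROOFS =====

-- A's fold step over (stack, remaining deletions)
def stepA (acc : List Int × Int) (n : Int) : List Int × Int :=
  if acc.2 != 0 && acc.1.getLast?.any (fun t => decide (t < n)) then
    (acc.1.dropLast ++ [n], acc.2 - 1)
  else
    (acc.1 ++ [n], acc.2)

-- scanDrop together with its final budget (the pair A's fold carries)
def scanP : Int → List Int → List Int × Int
  | b, [] => ([], b)
  | b, [x] => ([x], b)
  | b, x :: y :: r =>
    if b ≠ 0 ∧ x < y then scanP (b - 1) (y :: r)
    else ((scanP b (y :: r)).1.cons x, (scanP b (y :: r)).2)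

theorem scanP_fst : ∀ (b : Int) (ns : List Int), (scanP b ns).1 = scanDrop b ns := by
  intro b ns
  fun_induction scanP b ns <;> simp_all [scanDrop]

-- the invariant of A's stack loop: a stack ending in x behaves like scanP on x :: rest
theorem foldA_eq_scanP (ns : List Int) : ∀ (x b : Int) (s : List Int),
    ns.foldl stepA (s ++ [x], b) = (s ++ (scanP b (x :: ns)).1, (scanP b (x :: ns)).2) := by
  induction ns with
  | nil => intro x b s; simp [scanP]
  | cons n ns' ih =>
    intro x b s
    have hstep : stepA (s ++ [x], b) n =
        if b ≠ 0 ∧ x < n then (s ++ [n], b - 1) else ((s ++ [x]) ++ [n], b) := by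
      simp [stepA]
    by_cases h : b ≠ 0 ∧ x < n
    · simp only [List.foldl_cons, hstep, if_pos h]
      rw [ih n (b - 1) s]
      simp [scanP, h]
    · simp only [List.foldl_cons, hstep, if_neg h]
      rw [ih n b (s ++ [x])]
      simp [scanP, h, List.append_assoc]

theorem pickMax_eq (nums : List Int) (k : Int) : pickMaxA nums k = pickMaxB nums k := by
  cases nums with
  | nil => rfl
  | cons x rest =>
    have hA : pickMaxA (x :: rest) k =
        PySem.List.slice (((x :: rest).foldl stepA ([], ((x :: rest).length : Int) - k)).1)
          none (some k) := rfl
    have hfirst : stepA ([], ((x :: rest).length : Int) - k) x =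
        ([] ++ [x], ((x :: rest).length : Int) - k) := by simp [stepA]
    rw [hA]
    simp only [List.foldl_cons, hfirst, foldA_eq_scanP]
    simp [pickMaxB, scanP_fst]

-- the in-place suffix comparison computes Python's a[pa:] > b[pb:]
theorem suffixGt_eq : ∀ (f : Nat) (a b : List Int) (pa pb : Nat),
    min (a.length - pa) (b.length - pb) ≤ f →
    suffixGt f a b pa pb = pyGtL (a.drop pa) (b.drop pb) := by
  intro f
  induction f with
  | zero =>
    intro a b pa pb hf
    rcases min_le_iff.mp hf with h | h
    · have : a.drop pa = [] := by rw [List.drop_eq_nil_iff]; omega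
      simp [suffixGt, this, pyGtL]
      omega
    · have hb : b.drop pb = [] := by rw [List.drop_eq_nil_iff]; omega
      by_cases ha : pa < a.length
      · have hda : a.drop pa = a.getD pa 0 :: a.drop (pa + 1) := by
          rw [List.drop_eq_getElem_cons ha, List.getD_eq_getElem a 0 ha]
        rw [hda, hb]
        simp [suffixGt, ha, pyGtL]
      · have : a.drop pa = [] := by rw [List.drop_eq_nil_iff]; omega
        simp [suffixGt, this, pyGtL]
        omega
  | succ f ih =>
    intro a b pa pb hf
    by_cases h : pa < a.length ∧ pb < b.length
    · have hda : a.drop pa = a.getD pa 0 :: a.drop (pa + 1) := by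
        rw [List.drop_eq_getElem_cons h.1, List.getD_eq_getElem a 0 h.1]
      have hdb : b.drop pb = b.getD pb 0 :: b.drop (pb + 1) := by
        rw [List.drop_eq_getElem_cons h.2, List.getD_eq_getElem b 0 h.2]
      rw [suffixGt, if_pos h, hda, hdb]
      by_cases hne : a.getD pa 0 ≠ b.getD pb 0
      · rw [if_pos hne]
        simp [pyGtL]
        intro heq
        exact absurd heq hne
      · push Not at hne
        have hne' : a[pa]?.getD 0 = b[pb]?.getD 0 := by
          simpa [List.getD_eq_getElem?_getD] using hne
        rw [if_neg (not_ne_iff.mpr hne), ih a b (pa + 1) (pb + 1) (by omega)]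
        simp [pyGtL, hne']
    · rw [suffixGt, if_neg h]
      rcases not_and_or.mp h with ha | hb
      · have : a.drop pa = [] := by rw [List.drop_eq_nil_iff]; omega
        simp [this, pyGtL]
        omega
      · have hbnil : b.drop pb = [] := by rw [List.drop_eq_nil_iff]; omega
        by_cases ha : pa < a.length
        · have hda : a.drop pa = a.getD pa 0 :: a.drop (pa + 1) := by
            rw [List.drop_eq_getElem_cons ha, List.getD_eq_getElem a 0 ha]
          rw [hda, hbnil]
          simp [ha, pyGtL]
        · have : a.drop pa = [] := by rw [List.drop_eq_nil_iff]; omega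
          simp [this, pyGtL]
          omega

-- merge equivalence: the pointer walk sees exactly the suffixes A's loop holds
theorem mergeMax_eq (fuel : Nat) : ∀ (a b : List Int) (pa pb : Nat),
    mergeMaxB fuel a b pa pb = mergeMaxA fuel (a.drop pa) (b.drop pb) := by
  induction fuel with
  | zero => intro a b pa pb; rfl
  | succ f ih =>
    intro a b pa pb
    by_cases h : pa < a.length ∨ pb < b.length
    · have hne : ¬ (a.drop pa = [] ∧ b.drop pb = []) := by
        simp only [List.drop_eq_nil_iff]; omega
      rw [mergeMaxB, mergeMaxA, if_pos h, if_neg hne]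
      have hha : (a.drop pa).headI = a.getD pa 0 := by
        rw [List.getD_eq_getElem?_getD, ← List.head?_drop]
        cases a.drop pa <;> simp
      have hhb : (b.drop pb).headI = b.getD pb 0 := by
        rw [List.getD_eq_getElem?_getD, ← List.head?_drop]
        cases b.drop pb <;> simp
      rw [suffixGt_eq (a.length + b.length) a b pa pb (by omega)]
      by_cases hg : pyGtL (a.drop pa) (b.drop pb) = true
      · rw [if_pos hg, if_pos hg, ih a b (pa + 1) pb, List.tail_drop, hha]
      · rw [if_neg hg, if_neg hg, ih a b pa (pb + 1), List.tail_drop, hhb]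
    · have hnil : a.drop pa = [] ∧ b.drop pb = [] := by
        simp only [List.drop_eq_nil_iff]; omega
      rw [mergeMaxB, mergeMaxA, if_neg h, if_pos hnil]

-- max over a guarded generator
def maxStep (best : Option (List Int)) (c : List Int) : Option (List Int) :=
  match best with
  | none => some c
  | some bb => some (if pyGtL c bb then c else bb)

theorem maxFold_filter (l : List Int) (P : Int → Prop) [DecidablePred P] (f : Int → List Int) :
    ∀ acc : Option (List Int),
    l.foldl (fun best i => if P i then maxStep best (f i) else best) acc
      = ((l.filter (fun i => decide (P i))).map f).foldl maxStep acc := by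
  induction l with
  | nil => intro acc; rfl
  | cons i l' ih =>
    intro acc
    by_cases h : P i
    · simp [h, ih]
    · simp [h, ih]

theorem maxFold_some (l : List (List Int)) : ∀ c : List Int,
    l.foldl maxStep (some c)
      = some (l.foldl (fun best x => if pyGtL x best then x else best) c) := by
  induction l with
  | nil => intro c; rfl
  | cons x xs ih => intro c; simp [maxStep, ih]

-- ===== VERDICT (by name: the statement is the Claim_ definition above) =====
theorem sol_01_stack_spec : Claim_equal_sol_01_stack := by
  intro nums1 nums2 k _ _
  unfold Spec_sol_01_stack sol_01_stack sol_01_stack_alt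
  show (match (PySem.List.pyRange 0 (k + 1) 1).foldl
      (fun (best : Option (List Int)) i =>
        if i ≤ (nums1.length : Int) ∧ k - i ≤ (nums2.length : Int) then
          maxStep best (mergeMaxA ((pickMaxA nums1 i).length + (pickMaxA nums2 (k - i)).length)
            (pickMaxA nums1 i) (pickMaxA nums2 (k - i)))
        else best) none with
    | none => ([] : List Int)
    | some v => v)
    = (match ((PySem.List.pyRange 0 (k + 1) 1).filter
          (fun i => decide (i ≤ (nums1.length : Int) ∧ k - i ≤ (nums2.length : Int)))).map
          (fun i => mergeMaxB ((pickMaxB nums1 i).length + (pickMaxB nums2 (k - i)).length)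
            (pickMaxB nums1 i) (pickMaxB nums2 (k - i)) 0 0) with
      | [] => ([] : List Int)
      | c :: cs => cs.foldl (fun best x => if pyGtL x best then x else best) c)
  rw [maxFold_filter (P := fun i => i ≤ (nums1.length : Int) ∧ k - i ≤ (nums2.length : Int))]
  rw [List.map_congr_left
    (fun i _ => (by simp only [pickMax_eq, mergeMax_eq, List.drop_zero] :
      mergeMaxA ((pickMaxA nums1 i).length + (pickMaxA nums2 (k - i)).length)
        (pickMaxA nums1 i) (pickMaxA nums2 (k - i))
      = mergeMaxB ((pickMaxB nums1 i).length + (pickMaxB nums2 (k - i)).length)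
          (pickMaxB nums1 i) (pickMaxB nums2 (k - i)) 0 0))]
  cases hc : ((PySem.List.pyRange 0 (k + 1) 1).filter
      (fun i => decide (i ≤ (nums1.length : Int) ∧ k - i ≤ (nums2.length : Int)))).map
      (fun i => mergeMaxB ((pickMaxB nums1 i).length + (pickMaxB nums2 (k - i)).length)
        (pickMaxB nums1 i) (pickMaxB nums2 (k - i)) 0 0) with
  | nil => rfl
  | cons c cs =>
    have h1 : (c :: cs).foldl maxStep none = cs.foldl maxStep (some c) := rfl
    rw [h1, maxFold_some]
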